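-- pv_equiv track=rewrite | github.com/jef771/competitive_programming_practice | code_forces/466A/a.py | check_second
-- ===== SOURCE A (Python) =====
-- def check_second(n, m, a, b):
--     ans = 0
--     if b < a:
--         while n > 0:
--             n-=m
--             ans+=b
--
--         return ans
--
--     else:
--         while n > 0:
--             if n - m >= 0:
--                 n-=m
--                 ans+=b
--             else:
--                 n-=1
--                 ans+=a
--
--     return ans
-- ===== SOURCE B (Python) =====
-- def check_second(n, m, a, b):
--     # Closed form: no loop. Assumes m >= 1 (A loops forever otherwise when n > 0).
--     if n <= 0:
--         return 0
--     if b < a: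
--         return -(-n // m) * b          # ceil(n/m) payments of b
--     return (n // m) * b + (n % m) * a  # full steps of m cost b, remainder steps of 1 cost a
-- ===== Notes on version B (the rewrite author's own statement) =====
-- stated objective: faster
-- what changed: Replaced A's decrement-by-m / decrement-by-1 loops with an O(1) closed form: ceil(n/m)*b when b<a, otherwise (n//m)*b + (n%m)*a.
import Mathlib
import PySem

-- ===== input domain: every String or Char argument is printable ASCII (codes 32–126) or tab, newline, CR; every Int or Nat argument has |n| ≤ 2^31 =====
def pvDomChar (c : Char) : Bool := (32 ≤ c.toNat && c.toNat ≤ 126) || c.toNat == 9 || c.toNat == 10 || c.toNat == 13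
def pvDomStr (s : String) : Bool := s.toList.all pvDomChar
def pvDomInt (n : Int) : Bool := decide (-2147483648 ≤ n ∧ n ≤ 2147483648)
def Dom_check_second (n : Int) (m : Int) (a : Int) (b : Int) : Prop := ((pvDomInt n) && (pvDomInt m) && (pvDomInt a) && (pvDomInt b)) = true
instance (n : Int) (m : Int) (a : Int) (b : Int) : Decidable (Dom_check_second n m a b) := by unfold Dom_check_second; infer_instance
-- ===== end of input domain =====

-- B replaces A's two decrement loops by an O(1) closed form (ceil(n/m)*b, or (n//m)*b + (n%m)*a).

-- ===== PORT A =====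
-- A's first while-loop (the `b < a` branch), made total with fuel (one unit per iteration;
-- under Pre_ the loop runs at most n times, so fuel n.toNat is enough).
def pvLoop1 (fuel : Nat) (n m b ans : Int) : Int :=
  match fuel with
  | 0 => ans
  | f + 1 => if n > 0 then pvLoop1 f (n - m) m b (ans + b) else ans

-- A's second while-loop (the `else` branch), same fuel discipline.
def pvLoop2 (fuel : Nat) (n m a b ans : Int) : Int :=
  match fuel with
  | 0 => ans
  | f + 1 =>
    if n > 0 then
      if n - m ≥ 0 then pvLoop2 f (n - m) m a b (ans + b)
      else pvLoop2 f (n - 1) m a b (ans + a)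
    else ans

def check_second (n : Int) (m : Int) (a : Int) (b : Int) : Int :=
  if b < a then pvLoop1 n.toNat n m b 0 else pvLoop2 n.toNat n m a b 0

-- ===== PORT B =====
def check_second_alt (n : Int) (m : Int) (a : Int) (b : Int) : Int :=
  if n ≤ 0 then 0
  else if b < a then -(PySem.Int.floordiv (-n) m) * b
  else PySem.Int.floordiv n m * b + PySem.Int.mod n m * a

-- ===== PRECONDITION & SPEC =====
-- Pre_ excludes m ≤ 0 with n > 0: there A's while-loops never decrease n and Python diverges.
def Pre_check_second (n : Int) (m : Int) (a : Int) (b : Int) : Prop := 1 ≤ m ∨ n ≤ 0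
instance (n : Int) (m : Int) (a : Int) (b : Int) : Decidable (Pre_check_second n m a b) := by
  unfold Pre_check_second; infer_instance

def pvWitness_check_second : Int × Int × Int × Int := (10, 3, 2, 5)

def Spec_check_second (n : Int) (m : Int) (a : Int) (b : Int) (out : Int) : Prop := out = check_second_alt n m a b
instance (n : Int) (m : Int) (a : Int) (b : Int) (out : Int) : Decidable (Spec_check_second n m a b out) := by unfold Spec_check_second; infer_instance

-- ===== CLAIM (what is proved, stated in full; the proofs are below) =====
def Claim_equal_check_second : Prop := ∀ (n : Int) (m : Int) (a : Int) (b : Int), Dom_check_second n m a b → Pre_check_second n m a b → Spec_check_second n m a b (check_second n m a b)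

-- ===== LEMMAS AND PROOFS =====

-- floor division steps by one when the dividend steps by the divisor
theorem pv_fdiv_step (n m : Int) (hm : m ≠ 0) :
    PySem.Int.floordiv n m = PySem.Int.floordiv (n - m) m + 1 := by
  have h := Int.add_mul_fdiv_right (n - m) 1 hm
  have he : n - m + 1 * m = n := by ring
  rw [he] at h
  simpa [PySem.Int.floordiv] using h

theorem pv_fmod_step (n m : Int) (hm : m ≠ 0) :
    PySem.Int.mod n m = PySem.Int.mod (n - m) m := by
  have h1 := PySem.Int.floordiv_mul_add_mod n m
  have h2 := PySem.Int.floordiv_mul_add_mod (n - m) m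
  rw [pv_fdiv_step n m hm] at h1
  nlinarith [h1, h2]

-- closed form for A's first loop
theorem pvLoop1_eq (m b : Int) (hm : 1 ≤ m) :
    ∀ (fuel : Nat) (n ans : Int), n ≤ (fuel : Int) →
      pvLoop1 fuel n m b ans =
        ans + (if n ≤ 0 then 0 else -(PySem.Int.floordiv (-n) m)) * b := by
  intro fuel
  induction fuel with
  | zero =>
    intro n ans h
    have hn : n ≤ 0 := by exact_mod_cast h
    simp [pvLoop1, hn]
  | succ f ih =>
    intro n ans h
    by_cases hn : n ≤ 0
    · simp [pvLoop1, hn, show ¬ n > 0 by omega]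
    · have hn' : n > 0 := by omega
      have hrec : pvLoop1 (f + 1) n m b ans = pvLoop1 f (n - m) m b (ans + b) := by
        simp only [pvLoop1]; rw [if_pos hn']
      rw [hrec, ih (n - m) (ans + b) (by omega)]
      have hstep : (if n - m ≤ 0 then 0 else -(PySem.Int.floordiv (-(n - m)) m)) + 1
          = -(PySem.Int.floordiv (-n) m) := by
        by_cases hnm : n - m ≤ 0
        · -- 0 < n ≤ m : the ceiling is 1
          have h1 : -(PySem.Int.floordiv (-n) m) = 1 :=
            (PySem.Int.neg_floordiv_neg_eq_iff_of_pos (by omega)).mpr (by constructor <;> omega)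
          rw [if_pos hnm, h1]; norm_num
        · have h2 : PySem.Int.floordiv (-(n - m)) m = PySem.Int.floordiv (-n) m + 1 := by
            have h := Int.add_mul_fdiv_right (-n) 1 (show m ≠ 0 by omega)
            have he : -n + 1 * m = -(n - m) := by ring
            rw [he] at h
            simpa [PySem.Int.floordiv] using h
          rw [if_neg hnm, h2]; ring
      rw [if_neg hn, ← hstep]; ring

-- closed form for A's second loop (n stays nonnegative throughout)
theorem pvLoop2_eq (m a b : Int) (hm : 1 ≤ m) :
    ∀ (fuel : Nat) (n ans : Int), 0 ≤ n → n ≤ (fuel : Int) →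
      pvLoop2 fuel n m a b ans =
        ans + PySem.Int.floordiv n m * b + PySem.Int.mod n m * a := by
  intro fuel
  induction fuel with
  | zero =>
    intro n ans h0 h
    have : n = 0 := le_antisymm (by exact_mod_cast h) h0
    subst this
    simp [pvLoop2, PySem.Int.floordiv, PySem.Int.mod]
  | succ f ih =>
    intro n ans h0 h
    by_cases hn : n > 0
    · by_cases hnm : n - m ≥ 0
      · have hrec : pvLoop2 (f + 1) n m a b ans = pvLoop2 f (n - m) m a b (ans + b) := by
          simp only [pvLoop2]; rw [if_pos hn, if_pos hnm]
        rw [hrec, ih (n - m) (ans + b) (by omega) (by omega)]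
        rw [pv_fdiv_step n m (by omega), pv_fmod_step n m (by omega)]
        ring
      · -- 0 < n < m : one step of cost a; n and n-1 both lie in [0, m)
        have hrec : pvLoop2 (f + 1) n m a b ans = pvLoop2 f (n - 1) m a b (ans + a) := by
          simp only [pvLoop2]; rw [if_pos hn, if_neg hnm]
        rw [hrec, ih (n - 1) (ans + a) (by omega) (by omega)]
        have d1 : PySem.Int.floordiv (n - 1) m = 0 :=
          Int.fdiv_eq_zero_of_lt (by omega) (by omega)
        have d2 : PySem.Int.floordiv n m = 0 :=
          Int.fdiv_eq_zero_of_lt (by omega) (by omega)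
        have m1 : PySem.Int.mod (n - 1) m = n - 1 :=
          Int.fmod_eq_of_lt (by omega) (by omega)
        have m2 : PySem.Int.mod n m = n :=
          Int.fmod_eq_of_lt (by omega) (by omega)
        rw [d1, d2, m1, m2]; ring
    · have hn0 : n = 0 := by omega
      subst hn0
      simp [pvLoop2, PySem.Int.floordiv, PySem.Int.mod]

-- ===== VERDICT (by name: the statement is the Claim_ definition above) =====
theorem check_second_spec : Claim_equal_check_second := by
  intro n m a b _ hpre
  unfold Spec_check_second check_second check_second_alt
  by_cases hn : n ≤ 0
  · have : n.toNat = 0 := by omega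
    rw [this]
    simp [pvLoop1, pvLoop2, hn]
  · have hm : 1 ≤ m := by
      rcases hpre with h | h
      · exact h
      · omega
    have hfuel : n ≤ (n.toNat : Int) := by omega
    by_cases hba : b < a
    · rw [if_pos hba, if_neg hn, if_pos hba,
        pvLoop1_eq m b hm n.toNat n 0 hfuel, if_neg hn]
      ring
    · rw [if_neg hba, if_neg hn, if_neg hba,
        pvLoop2_eq m a b hm n.toNat n 0 (by omega) hfuel]
      ring
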